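-- pv_equiv track=rewrite | github.com/kavodsky/sequence-mining | src/sequence_mining/spam.py | calculate_sequences_sizes
-- ===== SOURCE A (Python) =====
-- from typing import List, Dict
--
-- def calculate_sequences_sizes(sequences: List[List[List[int]]]):
--     bit_index = 0
--     sequences_sizes = [bit_index]
--     for sequence in sequences:
--         bit_index += len(sequence)
--         if sequence != sequences[-1]:
--             sequences_sizes.append(bit_index)
--     last_bit_index = bit_index - 1
--     return last_bit_index, sequences_sizes
-- ===== SOURCE B (Python) =====
-- def calculate_sequences_sizes(sequences):
--     total = sum(len(s) for s in sequences)
--     last = sequences[-1] if sequences else None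
--     rev_sizes = []
--     off = total
--     for s in reversed(sequences):
--         if s != last:
--             rev_sizes.append(off)
--         off -= len(s)
--     return total - 1, [0] + rev_sizes[::-1]
-- ===== Notes on version B (the rewrite author's own statement) =====
-- stated objective: alternative
-- what changed: B precomputes the total length once, then traverses the list right-to-left subtracting each length from a descending offset, collecting the kept offsets back-to-front and reversing at the end, instead of A's left-to-right pass accumulating an ascending offset and appending in order.
import Mathlib
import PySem

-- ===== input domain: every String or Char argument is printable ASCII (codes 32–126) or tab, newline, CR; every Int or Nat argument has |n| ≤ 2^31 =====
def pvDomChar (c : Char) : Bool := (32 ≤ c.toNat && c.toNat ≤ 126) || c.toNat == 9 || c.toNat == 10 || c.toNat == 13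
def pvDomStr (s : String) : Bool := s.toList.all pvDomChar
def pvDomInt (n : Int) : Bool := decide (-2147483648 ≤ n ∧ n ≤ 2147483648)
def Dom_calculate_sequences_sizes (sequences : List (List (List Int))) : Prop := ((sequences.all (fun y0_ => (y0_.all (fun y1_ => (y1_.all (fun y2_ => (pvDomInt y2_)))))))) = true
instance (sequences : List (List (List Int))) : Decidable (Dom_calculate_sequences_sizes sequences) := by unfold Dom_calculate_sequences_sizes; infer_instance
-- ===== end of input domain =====

-- B precomputes the total length, then builds the size list by a right-to-left pass with a descending offset, reversed at the end (objective: alternative decomposition, same cost).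

-- ===== PORT A =====
def calculate_sequences_sizes (sequences : List (List (List Int))) : Int × List Int :=
  -- bit_index = 0; sequences_sizes = [bit_index]; for sequence in sequences: ...
  let st := sequences.foldl
    (fun (st : Int × List Int) sequence =>
      let bit : Int := st.1 + sequence.length
      (bit, if some sequence ≠ PySem.List.pyGet? sequences (-1) then st.2 ++ [bit] else st.2))
    (0, [0])
  (st.1 - 1, st.2)

-- ===== PORT B =====
def calculate_sequences_sizes_alt (sequences : List (List (List Int))) : Int × List Int :=
  -- total = sum(len(s) for s in sequences)
  let total : Int := sequences.foldl (fun a s => a + (s.length : Int)) 0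
  -- last = sequences[-1] if sequences else None
  let last : Option (List (List Int)) :=
    if sequences.isEmpty then none else PySem.List.pyGet? sequences (-1)
  -- for s in reversed(sequences): if s != last: rev_sizes.append(off); off -= len(s)
  let st := sequences.reverse.foldl
    (fun (st : Int × List Int) s =>
      ((st.1 - s.length, if some s ≠ last then st.2 ++ [st.1] else st.2) : Int × List Int))
    (total, [])
  -- return total - 1, [0] + rev_sizes[::-1]
  (total - 1, 0 :: st.2.reverse)

-- ===== PRECONDITION & SPEC =====
def Spec_calculate_sequences_sizes (sequences : List (List (List Int))) (out : Int × List Int) : Prop := out = calculate_sequences_sizes_alt sequences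
instance (sequences : List (List (List Int))) (out : Int × List Int) : Decidable (Spec_calculate_sequences_sizes sequences out) := by unfold Spec_calculate_sequences_sizes; infer_instance

-- ===== CLAIM (what is proved, stated in full; the proofs are below) =====
def Claim_equal_calculate_sequences_sizes : Prop := ∀ (sequences : List (List (List Int))), Dom_calculate_sequences_sizes sequences → Spec_calculate_sequences_sizes sequences (calculate_sequences_sizes sequences)

-- ===== LEMMAS AND PROOFS =====

-- total length of the sequences, as an Int
def pvS (xs : List (List (List Int))) : Int := (xs.map (fun s => (s.length : Int))).sum

-- the kept ascending offsets produced from start offset b, skipping sequences equal to `last`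
def pvG (last : List (List Int)) (b : Int) : List (List (List Int)) → List Int
  | [] => []
  | s :: t => (if s ≠ last then [b + (s.length : Int)] else []) ++ pvG last (b + s.length) t

theorem pvA_fold (last : List (List Int)) (L : List (List (List Int)))
    (hL : PySem.List.pyGet? L (-1) = some last) :
    ∀ (xs : List (List (List Int))) (b : Int) (acc : List Int),
      xs.foldl
        (fun (st : Int × List Int) sequence =>
          ((st.1 + (sequence.length : Int),
            if some sequence ≠ PySem.List.pyGet? L (-1) then st.2 ++ [st.1 + (sequence.length : Int)] else st.2) : Int × List Int))
        (b, acc) = (b + pvS xs, acc ++ pvG last b xs) := by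
  intro xs
  induction xs with
  | nil => intro b acc; simp [pvS, pvG]
  | cons s t ih =>
      intro b acc
      rw [List.foldl_cons]
      simp only [ih]
      simp only [hL, pvS, pvG, List.map_cons, List.sum_cons, Prod.mk.injEq]
      refine ⟨by ring, ?_⟩
      by_cases h : s = last <;> simp [h]

theorem pvSum_fold :
    ∀ (xs : List (List (List Int))) (a : Int),
      xs.foldl (fun a s => a + (s.length : Int)) a = a + pvS xs := by
  intro xs
  induction xs with
  | nil => intro a; simp [pvS]
  | cons s t ih =>
      intro a
      rw [List.foldl_cons, ih]
      simp [pvS]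
      ring

theorem pvB_fold (last : List (List Int)) :
    ∀ (xs : List (List (List Int))) (b : Int) (acc : List Int),
      xs.reverse.foldl
        (fun (st : Int × List Int) s =>
          ((st.1 - s.length, if some s ≠ some last then st.2 ++ [st.1] else st.2) : Int × List Int))
        (b + pvS xs, acc) = (b, acc ++ (pvG last b xs).reverse) := by
  intro xs
  induction xs with
  | nil => intro b acc; simp [pvS, pvG]
  | cons s t ih =>
      intro b acc
      rw [List.reverse_cons, List.foldl_append]
      have hb : b + pvS (s :: t) = (b + (s.length : Int)) + pvS t := by
        simp [pvS]; ring
      rw [hb, ih (b + (s.length : Int)) acc]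
      simp only [List.foldl_cons, List.foldl_nil, pvG, List.reverse_append]
      by_cases h : s = last <;> simp [h]

-- ===== VERDICT (by name: the statement is the Claim_ definition above) =====
theorem calculate_sequences_sizes_spec : Claim_equal_calculate_sequences_sizes := by
  intro sequences _
  unfold Spec_calculate_sequences_sizes calculate_sequences_sizes calculate_sequences_sizes_alt
  cases hL : sequences.getLast? with
  | none =>
      have : sequences = [] := List.getLast?_eq_none_iff.mp hL
      subst this; rfl
  | some last =>
      have hne : sequences.isEmpty = false := by
        cases sequences with
        | nil => simp at hL
        | cons a t => rfl
      have hget : PySem.List.pyGet? sequences (-1) = some last := by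
        rw [PySem.List.pyGet?_neg_one, hL]
      have htot : sequences.foldl (fun a s => a + (s.length : Int)) 0 = pvS sequences := by
        simpa using pvSum_fold sequences 0
      have hB := pvB_fold last sequences 0 []
      rw [zero_add] at hB
      dsimp only
      rw [pvA_fold last sequences hget sequences 0 [0], hne, hget, htot]
      simp only [Bool.false_eq_true, if_false]
      rw [hB]
      simp
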